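-- pv_equiv track=rewrite | github.com/bishal692002/DrGViswanathanChallenge-GFG | Difficulty: Easy/Shop in Candy Store/shop-in-candy-store.py | minMaxCandy
-- ===== SOURCE A (Python) =====
-- def minMaxCandy(prices, k):
--     # code here
--     prices.sort()
--     n = len(prices)
--     mini = 0
--     maxi = 0
--     # res = []
--     i,j = 0 , n-1
--     while(i<=j):
--         mini += prices[i]
--         i += 1
--         j -= k
--
--     i,j = 0 , n-1
--     while(i<=j):
--         maxi += prices[j]
--         j -= 1
--         i += k
--
--     return [mini,maxi]
-- ===== SOURCE B (Python) =====
-- def minMaxCandy(prices, k):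
--     prices.sort()
--     n = len(prices)
--     m = (n + k) // (k + 1)
--     return [sum(prices[:m]), sum(prices[n - m:])]
-- ===== Notes on version B (the rewrite author's own statement) =====
-- stated objective: simpler
-- what changed: B replaces both pointer-stepping while loops with a closed-form purchase count m = (n + k) // (k + 1) and two slice sums over the sorted list (m cheapest, m dearest).
-- outside the precondition, e.g. on minMaxCandy([], -1): A returns [0, 0], B raises ZeroDivisionError
import Mathlib
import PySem

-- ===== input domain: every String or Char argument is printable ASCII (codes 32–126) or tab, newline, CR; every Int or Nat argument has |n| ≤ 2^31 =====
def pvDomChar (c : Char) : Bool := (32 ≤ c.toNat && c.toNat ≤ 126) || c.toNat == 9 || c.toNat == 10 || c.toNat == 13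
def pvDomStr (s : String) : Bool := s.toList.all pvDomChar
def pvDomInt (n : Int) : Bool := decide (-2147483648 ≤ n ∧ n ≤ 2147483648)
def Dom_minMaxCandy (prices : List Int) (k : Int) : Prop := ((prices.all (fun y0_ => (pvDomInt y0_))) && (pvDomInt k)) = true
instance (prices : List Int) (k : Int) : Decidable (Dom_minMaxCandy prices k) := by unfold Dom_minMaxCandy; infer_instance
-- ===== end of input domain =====

-- B replaces A's two pointer-walking while loops with a closed-form purchase count
-- m = (n + k) // (k + 1) and two slice sums over the sorted list (objective: simpler).
-- Both A and B sort `prices` in place; the equivalence proved here is about the return value.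


-- ===== PORT A =====
-- first while loop: while i <= j: mini += prices[i]; i += 1; j -= k
-- (fuel and the `pyGetD … 0` default only totalize the function; inside Pre_ the
--  fuel is never exhausted and every access is in range)
def aLoop1 (ps : List Int) (k : Int) : Nat → Int → Int → Int → Int
  | 0, _, _, acc => acc
  | f + 1, i, j, acc =>
      if i ≤ j then aLoop1 ps k f (i + 1) (j - k) (acc + PySem.List.pyGetD ps i 0)
      else acc

-- second while loop: while i <= j: maxi += prices[j]; j -= 1; i += k
def aLoop2 (ps : List Int) (k : Int) : Nat → Int → Int → Int → Int
  | 0, _, _, acc => acc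
  | f + 1, i, j, acc =>
      if i ≤ j then aLoop2 ps k f (i + k) (j - 1) (acc + PySem.List.pyGetD ps j 0)
      else acc

def minMaxCandy (prices : List Int) (k : Int) : List Int :=
  let ps := PySem.List.sorted prices id
  let n : Int := ps.length
  let mini := aLoop1 ps k (ps.length + 1) 0 (n - 1) 0
  let maxi := aLoop2 ps k (ps.length + 1) 0 (n - 1) 0
  [mini, maxi]

-- ===== PORT B =====
def minMaxCandy_alt (prices : List Int) (k : Int) : List Int :=
  let ps := PySem.List.sorted prices id
  let n : Int := ps.length
  let m := PySem.Int.floordiv (n + k) (k + 1)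
  [(PySem.List.slice ps none (some m)).sum, (PySem.List.slice ps (some (n - m)) none).sum]

-- ===== PRECONDITION & SPEC =====
-- Pre_ excludes negative k with a nonempty list, where A raises IndexError, and the
-- single input ([], -1), where A returns the trivial [0, 0] but B's closed-form
-- count divides by k + 1 = 0 and raises ZeroDivisionError.
def Pre_minMaxCandy (prices : List Int) (k : Int) : Prop :=
  0 ≤ k ∨ (prices = [] ∧ k ≠ -1)
instance (prices : List Int) (k : Int) : Decidable (Pre_minMaxCandy prices k) := by
  unfold Pre_minMaxCandy; infer_instance

def pvWitness_minMaxCandy : List Int × Int := ([3, 1, 5, 2], 2)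

def Spec_minMaxCandy (prices : List Int) (k : Int) (out : List Int) : Prop := out = minMaxCandy_alt prices k
instance (prices : List Int) (k : Int) (out : List Int) : Decidable (Spec_minMaxCandy prices k out) := by unfold Spec_minMaxCandy; infer_instance

-- ===== CLAIM (what is proved, stated in full; the proofs are below) =====
def Claim_equal_minMaxCandy : Prop := ∀ (prices : List Int) (k : Int), Dom_minMaxCandy prices k → Pre_minMaxCandy prices k → Spec_minMaxCandy prices k (minMaxCandy prices k)

-- ===== LEMMAS AND PROOFS =====

theorem minMaxCandy_def (prices : List Int) (k : Int) :
    minMaxCandy prices k =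
      [aLoop1 (PySem.List.sorted prices id) k ((PySem.List.sorted prices id).length + 1) 0
         (((PySem.List.sorted prices id).length : Int) - 1) 0,
       aLoop2 (PySem.List.sorted prices id) k ((PySem.List.sorted prices id).length + 1) 0
         (((PySem.List.sorted prices id).length : Int) - 1) 0] := rfl

theorem minMaxCandy_alt_def (prices : List Int) (k : Int) :
    minMaxCandy_alt prices k =
      [(PySem.List.slice (PySem.List.sorted prices id) none
          (some (PySem.Int.floordiv (((PySem.List.sorted prices id).length : Int) + k) (k + 1)))).sum,
       (PySem.List.slice (PySem.List.sorted prices id)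
          (some (((PySem.List.sorted prices id).length : Int) -
            PySem.Int.floordiv (((PySem.List.sorted prices id).length : Int) + k) (k + 1))) none).sum] := rfl

-- The loop condition, in terms of the closed-form count M: from state t the loop
-- continues iff t < M, where M*(k+1) brackets n+k.
theorem pv_cond_iff {k mI : Int} {n : Nat} (hk : 0 ≤ k)
    (h1 : mI * (k + 1) ≤ (n : Int) + k) (h2 : (n : Int) + k < (mI + 1) * (k + 1))
    (t : Nat) : ((t : Int) * (k + 1) ≤ (n : Int) - 1) ↔ (t : Int) < mI := by
  constructor
  · intro h
    by_contra hnot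
    have hnot' : mI ≤ (t : Int) := by omega
    nlinarith [mul_le_mul_of_nonneg_right hnot' (by linarith : (0:Int) ≤ k + 1)]
  · intro h
    nlinarith [mul_le_mul_of_nonneg_right (by linarith : (t : Int) + 1 ≤ mI) (by linarith : (0:Int) ≤ k + 1)]

theorem pv_loop1_inv (ps : List Int) (k : Int) (M : Nat) (hM : M ≤ ps.length)
    (hcond : ∀ t : Nat, ((t : Int) * (k + 1) ≤ (ps.length : Int) - 1) ↔ (t : Int) < (M : Int)) :
    ∀ (f t : Nat) (acc : Int), t ≤ M → M - t ≤ f →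
      aLoop1 ps k f (t : Int) ((ps.length : Int) - 1 - t * k) acc
        = acc + ((ps.drop t).take (M - t)).sum := by
  intro f
  induction f with
  | zero =>
      intro t acc ht hf
      have : M = t := by omega
      simp [aLoop1, this]
  | succ f ih =>
      intro t acc ht hf
      by_cases hlt : t < M
      · have hc : (t : Int) ≤ (ps.length : Int) - 1 - t * k := by
          have := (hcond t).mpr (by exact_mod_cast hlt)
          linarith
        have htl : t < ps.length := by omega
        have hstep : aLoop1 ps k (f + 1) (t : Int) ((ps.length : Int) - 1 - t * k) acc
            = aLoop1 ps k f ((t : Int) + 1) ((ps.length : Int) - 1 - t * k - k)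
                (acc + PySem.List.pyGetD ps (t : Int) 0) := by
          simp [aLoop1, hc]
        rw [hstep]
        have e1 : ((t : Int) + 1) = ((t + 1 : Nat) : Int) := by push_cast; ring
        have e2 : (ps.length : Int) - 1 - t * k - k = (ps.length : Int) - 1 - (t + 1 : Nat) * k := by
          push_cast; ring
        rw [e1, e2, ih (t + 1) _ (by omega) (by omega)]
        rw [PySem.List.pyGetD_natCast]
        have hget : ps.getD t 0 = ps[t] := List.getD_eq_getElem ps 0 htl
        have hdrop : ps.drop t = ps[t] :: ps.drop (t + 1) := (List.getElem_cons_drop htl).symm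
        have hMt : M - t = (M - (t + 1)) + 1 := by omega
        rw [hget, hMt, hdrop, List.take_succ_cons, List.sum_cons]
        ring
      · have ht' : t = M := by omega
        subst ht'
        have hc : ¬ ((t : Int) ≤ (ps.length : Int) - 1 - t * k) := by
          intro h
          have := (hcond t).mp (by linarith)
          omega
        simp [aLoop1, hc]

theorem pv_loop2_inv (ps : List Int) (k : Int) (M : Nat) (hM : M ≤ ps.length)
    (hcond : ∀ t : Nat, ((t : Int) * (k + 1) ≤ (ps.length : Int) - 1) ↔ (t : Int) < (M : Int)) :
    ∀ (f t : Nat) (acc : Int), t ≤ M → M - t ≤ f →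
      aLoop2 ps k f ((t : Int) * k) ((ps.length : Int) - 1 - t) acc
        = acc + ((ps.drop (ps.length - M)).take (M - t)).sum := by
  intro f
  induction f with
  | zero =>
      intro t acc ht hf
      have : M = t := by omega
      simp [aLoop2, this]
  | succ f ih =>
      intro t acc ht hf
      by_cases hlt : t < M
      · have hc : (t : Int) * k ≤ (ps.length : Int) - 1 - t := by
          have := (hcond t).mpr (by exact_mod_cast hlt)
          linarith
        have htl : t < ps.length := by omega
        have hstep : aLoop2 ps k (f + 1) ((t : Int) * k) ((ps.length : Int) - 1 - t) acc
            = aLoop2 ps k f ((t : Int) * k + k) ((ps.length : Int) - 1 - t - 1)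
                (acc + PySem.List.pyGetD ps ((ps.length : Int) - 1 - t) 0) := by
          simp [aLoop2, hc]
        rw [hstep]
        have e1 : (t : Int) * k + k = ((t + 1 : Nat) : Int) * k := by push_cast; ring
        have e2 : (ps.length : Int) - 1 - t - 1 = (ps.length : Int) - 1 - (t + 1 : Nat) := by
          push_cast; ring
        have e3 : (ps.length : Int) - 1 - t = ((ps.length - 1 - t : Nat) : Int) := by
          omega
        rw [e1, e2, e3, ih (t + 1) _ (by omega) (by omega), PySem.List.pyGetD_natCast]
        have hidx : ps.length - 1 - t < ps.length := by omega
        have hget : ps.getD (ps.length - 1 - t) 0 = ps[ps.length - 1 - t] :=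
          List.getD_eq_getElem ps 0 hidx
        have hMt : M - t = (M - (t + 1)) + 1 := by omega
        have hlen : M - (t + 1) < (ps.drop (ps.length - M)).length := by
          simp [List.length_drop]; omega
        have htake : (ps.drop (ps.length - M)).take (M - t)
            = (ps.drop (ps.length - M)).take (M - (t + 1)) ++ [(ps.drop (ps.length - M))[M - (t + 1)]] := by
          rw [hMt, List.take_add_one, List.getElem?_eq_getElem hlen]
          rfl
        have hel : (ps.drop (ps.length - M))[M - (t + 1)]'hlen = ps[ps.length - 1 - t] := by
          rw [List.getElem_drop]
          congr 1
          omega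
        rw [hget, htake, List.sum_append, hel]
        simp
        ring
      · have ht' : t = M := by omega
        subst ht'
        have hc : ¬ ((t : Int) * k ≤ (ps.length : Int) - 1 - t) := by
          intro h
          have := (hcond t).mp (by linarith)
          omega
        simp [aLoop2, hc]

-- ===== VERDICT (by name: the statement is the Claim_ definition above) =====
theorem minMaxCandy_spec : Claim_equal_minMaxCandy := by
  intro prices k _ hpre
  unfold Spec_minMaxCandy
  rw [minMaxCandy_def, minMaxCandy_alt_def]
  rcases hpre with hk | ⟨hnil, hk1⟩
  · -- main case: 0 ≤ k
    set ps := PySem.List.sorted prices id with hps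
    set n : Nat := ps.length with hn
    set mI : Int := PySem.Int.floordiv ((n : Int) + k) (k + 1) with hmI
    have hkpos : (0 : Int) < k + 1 := by linarith
    obtain ⟨h1, h2⟩ := (PySem.Int.floordiv_eq_iff_of_pos hkpos).mp hmI.symm
    have hm0 : 0 ≤ mI := by nlinarith
    have hmn : mI ≤ (n : Int) := by nlinarith
    set M : Nat := mI.toNat with hMdef
    have hMI : (M : Int) = mI := Int.toNat_of_nonneg hm0
    have hMn : M ≤ n := by omega
    have hcond : ∀ t : Nat, ((t : Int) * (k + 1) ≤ (n : Int) - 1) ↔ (t : Int) < (M : Int) := by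
      intro t
      rw [hMI]
      exact pv_cond_iff hk h1 h2 t
    have hL1 := pv_loop1_inv ps k M hMn hcond (n + 1) 0 0 (by omega) (by omega)
    have hL2 := pv_loop2_inv ps k M hMn hcond (n + 1) 0 0 (by omega) (by omega)
    simp only [Nat.cast_zero, zero_mul, sub_zero, zero_add, Nat.sub_zero,
      List.drop_zero] at hL1 hL2
    rw [hL1, hL2]
    rw [PySem.List.slice_to ps hm0, PySem.List.slice_from ps (by linarith : (0:Int) ≤ (n : Int) - mI)]
    have e1 : mI.toNat = M := rfl
    have e2 : ((n : Int) - mI).toNat = n - M := by omega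
    have e3 : (List.drop (n - M) ps).length ≤ M := by
      simp [List.length_drop]; omega
    rw [e1, e2, List.take_of_length_le e3]
  · -- prices = [], k ≤ -2 (or any k ≠ -1 with k < 0): everything is empty / zero
    subst hnil
    have hps : PySem.List.sorted ([] : List Int) id = [] := by simp [PySem.List.sorted]
    simp only [hps, List.length_nil, Nat.cast_zero]
    have h1 : aLoop1 [] k (0 + 1) 0 ((0 : Int) - 1) 0 = 0 := by
      norm_num [aLoop1]
    have h2 : aLoop2 [] k (0 + 1) 0 ((0 : Int) - 1) 0 = 0 := by
      norm_num [aLoop2]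
    simp only [h1, h2]
    simp [PySem.List.slice]
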